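-- pv_equiv track=rewrite | github.com/michel-giehl/Reti-Emulator | src/utility.py | read_pattern
-- ===== SOURCE A (Python) =====
-- def read_pattern(pattern, instruction):
--     curr = None
--     response = dict()
--     for i, chr in enumerate(pattern):
--         if curr is None or curr != chr:
--             curr = chr
--             response[curr] = 0
--         mask_raw = 1 << (len(pattern) - 1 - i)
--         response[curr] |= mask_raw & instruction
--         # response[curr]["raw"] |= mask_raw & instruction
--     return response
-- ===== SOURCE B (Python) =====
-- def read_pattern(pattern, instruction):
--     n = len(pattern)
--
--     def runs(s):
--         out = []
--         i = 0
--         while i < len(s):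
--             ch = s[i]
--             j = i + 1
--             while j < len(s) and s[j] == ch:
--                 j += 1
--             out.append((ch, j - i))
--             i = j
--         return out
--
--     response = {}
--     i = 0
--     for ch, k in runs(pattern):
--         val = 0
--         for j in range(i, i + k):
--             val |= (1 << (n - 1 - j)) & instruction
--         response[ch] = val
--         i += k
--     return response
-- ===== Notes on version B (the rewrite author's own statement) =====
-- stated objective: alternative
-- what changed: B replaces A's per-character pass with a curr sentinel and repeated dict reset/OR-update by an explicit run decomposition: it first splits the pattern into maximal runs of equal characters, then computes each run's value in a fresh inner accumulation over the run's index range and assigns it once per run.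
import Mathlib
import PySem

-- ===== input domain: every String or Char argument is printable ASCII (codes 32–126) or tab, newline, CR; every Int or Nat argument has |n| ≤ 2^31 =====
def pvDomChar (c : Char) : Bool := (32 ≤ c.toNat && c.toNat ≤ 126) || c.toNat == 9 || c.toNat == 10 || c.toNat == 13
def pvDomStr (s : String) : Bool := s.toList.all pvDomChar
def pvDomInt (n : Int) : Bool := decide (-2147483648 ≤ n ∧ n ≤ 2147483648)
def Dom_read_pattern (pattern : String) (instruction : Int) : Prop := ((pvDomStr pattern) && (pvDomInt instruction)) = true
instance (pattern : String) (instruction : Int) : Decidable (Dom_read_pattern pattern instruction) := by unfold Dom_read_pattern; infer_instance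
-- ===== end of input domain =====

-- B replaces A's per-character pass (curr sentinel, dict reset/OR update at every character)
-- by an explicit maximal-run decomposition with one fresh accumulation and one assignment per run; same cost.

-- ===== PORT A =====
-- loop body of A's `for i, chr in enumerate(pattern)`; state = (curr, response)
def pvStepA (n instruction : Int) (st : Option Char × PySem.Dict String Int)
    (p : Int × Char) : Option Char × PySem.Dict String Int :=
  let curr := st.1
  let response := st.2
  let i := p.1
  let c := p.2
  let s := if curr = none ∨ curr ≠ some c then (some c, response.insert (String.ofList [c]) 0)
           else (curr, response)
  let mask_raw : Int := (1 : Int) <<< (n - 1 - i).toNat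
  (s.1, s.2.modify (String.ofList [c]) 0 (fun v => PySem.Int.bor v (PySem.Int.band mask_raw instruction)))

def read_pattern (pattern : String) (instruction : Int) : List (String × Int) :=
  let cs := pattern.toList
  let n : Int := cs.length
  ((PySem.List.enumerate cs).foldl (pvStepA n instruction) (none, PySem.Dict.empty)).2.items

-- ===== PORT B =====
-- Source B's `runs`: split the character list into maximal runs of equal characters (char, run length)
def pvRuns : List Char → List (Char × Nat)
  | [] => []
  | c :: rest =>
      (c, (rest.takeWhile (· == c)).length + 1) :: pvRuns (rest.dropWhile (· == c))
termination_by l => l.length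
decreasing_by simpa using Nat.lt_succ_of_le (List.length_dropWhile_le (· == c) rest)

-- Source B's main loop over the runs: fresh per-run accumulation over the run's index range, one assignment per run
def pvGoB (n instruction : Int) : List (Char × Nat) → Int → PySem.Dict String Int → PySem.Dict String Int
  | [], _, d => d
  | (c, k) :: rs, i, d =>
      let val := (PySem.List.pyRange i (i + (k : Int)) 1).foldl
        (fun v j => PySem.Int.bor v (PySem.Int.band ((1 : Int) <<< (n - 1 - j).toNat) instruction)) 0
      pvGoB n instruction rs (i + (k : Int)) (d.insert (String.ofList [c]) val)

def read_pattern_alt (pattern : String) (instruction : Int) : List (String × Int) :=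
  let cs := pattern.toList
  let n : Int := cs.length
  (pvGoB n instruction (pvRuns cs) 0 PySem.Dict.empty).items

-- ===== PRECONDITION & SPEC =====
def Spec_read_pattern (pattern : String) (instruction : Int) (out : List (String × Int)) : Prop := out = read_pattern_alt pattern instruction
instance (pattern : String) (instruction : Int) (out : List (String × Int)) : Decidable (Spec_read_pattern pattern instruction out) := by unfold Spec_read_pattern; infer_instance

-- ===== CLAIM (what is proved, stated in full; the proofs are below) =====
def Claim_equal_read_pattern : Prop := ∀ (pattern : String) (instruction : Int), Dom_read_pattern pattern instruction → Spec_read_pattern pattern instruction (read_pattern pattern instruction)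

-- ===== LEMMAS AND PROOFS =====

theorem pv_insert_insert {κ ν : Type} [BEq κ] [LawfulBEq κ] (d : PySem.Dict κ ν) (k : κ) (v w : ν) :
    (d.insert k v).insert k w = d.insert k w := by
  have hc : (d.insert k v).contains k = true := by simp
  apply PySem.Dict.ext
  rw [PySem.Dict.items_insert, if_pos hc, PySem.Dict.items_insert, PySem.Dict.items_insert]
  by_cases h : d.contains k = true
  · rw [if_pos h, if_pos h, List.map_map]
    congr 1; funext p; by_cases hp : p.1 = k <;> simp [hp]
  · rw [if_neg h, if_neg h, List.map_append]
    congr 1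
    · conv_rhs => rw [← List.map_id d.items]
      apply List.map_congr_left; intro p hp
      have : ¬ (p.1 == k) = true := by
        intro he; exact h (by simpa [PySem.Dict.contains] using List.any_eq_true.mpr (⟨p, hp, he⟩ : ∃ x ∈ d.items, (x.1 == k) = true))
      simp [this]
    · simp

theorem pv_modify_insert {κ ν : Type} [BEq κ] [LawfulBEq κ] (d : PySem.Dict κ ν) (k : κ) (v d0 : ν) (f : ν → ν) :
    (d.insert k v).modify k d0 f = d.insert k (f v) := by
  rw [PySem.Dict.modify, PySem.Dict.getD_insert_self, pv_insert_insert]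

theorem pv_runA (n instruction : Int) (c : Char) (l : List Char) (hl : ∀ x ∈ l, x = c) :
    ∀ (i v : Int) (d : PySem.Dict String Int),
      (PySem.List.enumerate l i).foldl (pvStepA n instruction) (some c, d.insert (String.ofList [c]) v)
      = (some c, d.insert (String.ofList [c])
          ((PySem.List.enumerate l i).foldl
            (fun v p => PySem.Int.bor v (PySem.Int.band ((1 : Int) <<< (n - 1 - p.1).toNat) instruction)) v)) := by
  induction l with
  | nil => intro i v d; simp [PySem.List.enumerate]
  | cons x l ih =>
    intro i v d
    have hx : x = c := hl x List.mem_cons_self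
    subst hx
    rw [PySem.List.enumerate_cons, List.foldl_cons, List.foldl_cons]
    have hstep : pvStepA n instruction (some x, d.insert (String.ofList [x]) v) (i, x)
        = (some x, d.insert (String.ofList [x])
            (PySem.Int.bor v (PySem.Int.band ((1 : Int) <<< (n - 1 - i).toNat) instruction))) := by
      simp [pvStepA, pv_modify_insert]
    rw [hstep, ih (fun y hy => hl y (List.mem_cons_of_mem _ hy))]

theorem pv_mainA (n instruction : Int) :
    ∀ (m : Nat) (cs : List Char), cs.length ≤ m → ∀ (i : Int) (curr : Option Char) (d : PySem.Dict String Int),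
      (∀ c, cs.head? = some c → curr ≠ some c) →
      ((PySem.List.enumerate cs i).foldl (pvStepA n instruction) (curr, d)).2
      = pvGoB n instruction (pvRuns cs) i d := by
  intro m
  induction m with
  | zero =>
    intro cs hlen i curr d _
    have : cs = [] := List.eq_nil_of_length_eq_zero (Nat.le_zero.mp hlen)
    subst this; simp [PySem.List.enumerate, pvRuns, pvGoB]
  | succ m ih =>
    intro cs hlen i curr d hcur
    cases cs with
    | nil => simp [PySem.List.enumerate, pvRuns, pvGoB]
    | cons c rest =>
      have hcurne : curr ≠ some c := hcur c rfl
      set t := rest.takeWhile (· == c) with ht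
      set r := rest.dropWhile (· == c) with hr
      have hsplit : rest = t ++ r := (List.takeWhile_append_dropWhile).symm
      rw [PySem.List.enumerate_cons, List.foldl_cons]
      conv_lhs => rw [hsplit]
      rw [PySem.List.enumerate_append, List.foldl_append]
      have hstep : pvStepA n instruction (curr, d) (i, c)
          = (some c, d.insert (String.ofList [c])
              (PySem.Int.bor 0 (PySem.Int.band ((1 : Int) <<< (n - 1 - i).toNat) instruction))) := by
        have : (curr = none ∨ curr ≠ some c) := Or.inr hcurne
        simp [pvStepA, if_pos this, pv_modify_insert]
      rw [hstep]
      have htall : ∀ x ∈ t, x = c := by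
        intro x hx
        have := List.mem_takeWhile_imp hx
        simpa using this
      rw [pv_runA n instruction c t htall]
      -- now the remaining fold over r
      have hrhead : ∀ c', r.head? = some c' → (some c : Option Char) ≠ some c' := by
        intro c' hh heq
        have := List.head?_dropWhile_not (· == c) rest
        rw [← hr, hh] at this
        simp at this
        exact this (by injection heq with h; exact h.symm)
      have hrlen : r.length ≤ m := by
        have h1 : r.length ≤ rest.length := by rw [hr]; exact List.length_dropWhile_le _ _
        have h2 : rest.length + 1 ≤ m + 1 := by simpa using hlen
        omega
      rw [ih r hrlen (i + 1 + t.length) (some c) _ hrhead]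
      -- RHS
      show pvGoB n instruction (pvRuns r) (i + 1 + ↑t.length) _ = pvGoB n instruction (pvRuns (c :: rest)) i d
      rw [pvRuns]
      rw [pvGoB]
      have hb : i < i + ((t.length + 1 : Nat) : Int) := by push_cast; omega
      have hidx : i + ((t.length + 1 : Nat) : Int) = i + 1 + (t.length : Int) := by push_cast; ring
      rw [PySem.List.pyRange_one_cons hb, List.foldl_cons, hidx]
      congr 2
      have hmap := PySem.List.map_fst_enumerate t (i + 1)
      rw [← hmap, List.foldl_map]

-- ===== VERDICT (by name: the statement is the Claim_ definition above) =====
theorem read_pattern_spec : Claim_equal_read_pattern := by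
  intro pattern instruction _
  show read_pattern pattern instruction = read_pattern_alt pattern instruction
  simp only [read_pattern, read_pattern_alt]
  have h := pv_mainA (pattern.toList.length : Int) instruction pattern.toList.length
      pattern.toList le_rfl 0 none PySem.Dict.empty (fun c _ => by simp)
  rw [h]
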